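-- pv_equiv track=rewrite | github.com/urwid/urwid | examples/edit.py | re_tab
-- ===== SOURCE A (Python) =====
-- def re_tab(s) -> str:
--     """Return a tabbed string from an expanded one."""
--     line = []
--     p = 0
--     for i in range(8, len(s), 8):
--         if s[i - 2 : i] == "  ":
--             # collapse two or more spaces into a tab
--             line.append(f"{s[p:i].rstrip()}\t")
--             p = i
--
--     if p == 0:
--         return s
--
--     line.append(s[p:])
--     return "".join(line)
-- ===== SOURCE B (Python) =====
-- def re_tab(s) -> str:
--     """Return a tabbed string from an expanded one."""
--     parts = []
--     pending = ""
--     for k in range(0, len(s), 8):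
--         if pending.endswith("  "):
--             # tab stop at k follows two spaces: emit collapsed segment
--             parts.append(pending.rstrip() + "\t")
--             pending = s[k : k + 8]
--         else:
--             pending += s[k : k + 8]
--     if not parts:
--         return s
--     return "".join(parts) + pending
-- ===== Notes on version B (the rewrite author's own statement) =====
-- stated objective: alternative
-- what changed: A scans the tab-stop indices 8,16,... probing s[i-2:i] and slicing segments s[p:i] with a moving cursor p; B streams the string as fixed 8-character chunks, keeping a pending buffer that either absorbs the next chunk or, when it ends in two spaces (meaning a tab stop follows two spaces), is flushed right-stripped with a tab appended.
import Mathlib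
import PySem

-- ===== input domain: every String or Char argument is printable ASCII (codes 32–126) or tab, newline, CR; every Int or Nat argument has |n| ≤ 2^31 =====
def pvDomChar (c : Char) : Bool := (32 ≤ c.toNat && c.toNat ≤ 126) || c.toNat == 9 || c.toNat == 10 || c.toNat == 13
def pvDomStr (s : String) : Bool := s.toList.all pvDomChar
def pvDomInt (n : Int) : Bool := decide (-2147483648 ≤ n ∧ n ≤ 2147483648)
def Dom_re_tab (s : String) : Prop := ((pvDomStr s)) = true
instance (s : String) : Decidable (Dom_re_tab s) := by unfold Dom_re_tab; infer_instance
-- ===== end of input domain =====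

-- B replaces A's tab-stop index scan (probe s[i-2:i], slice s[p:i] with a moving cursor p) by a
-- streaming pass over fixed 8-character chunks with a pending buffer; objective: alternative.


-- ===== PORT A =====
-- loop body: if s[i-2:i] == "  ": line.append(s[p:i].rstrip() + "\t"); p = i
def reTabStepA (cs : List Char) (st : List (List Char) × Int) (i : Int) :
    List (List Char) × Int :=
  if PySem.List.slice cs (some (i - 2)) (some i) = [' ', ' '] then
    (st.1 ++ [PySem.Chars.rstrip (PySem.List.slice cs (some st.2) (some i)) ++ ['\t']], i)
  else st

def re_tab (s : String) : String :=
  let cs := s.toList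
  let st := (PySem.List.pyRange 8 (cs.length : Int) 8).foldl (reTabStepA cs) ([], 0)
  if st.2 = 0 then s
  else String.ofList (PySem.Chars.join []
    (st.1 ++ [PySem.List.slice cs (some st.2) none]))

-- ===== PORT B =====
-- loop body: if pending.endswith("  "): parts.append(pending.rstrip()+"\t"); pending = s[k:k+8]
--            else: pending += s[k:k+8]
def reTabStepB (cs : List Char) (st : List (List Char) × List Char) (k : Int) :
    List (List Char) × List Char :=
  if PySem.Chars.endswith st.2 [' ', ' '] then
    (st.1 ++ [PySem.Chars.rstrip st.2 ++ ['\t']], PySem.List.slice cs (some k) (some (k + 8)))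
  else (st.1, st.2 ++ PySem.List.slice cs (some k) (some (k + 8)))

def re_tab_alt (s : String) : String :=
  let cs := s.toList
  let st := (PySem.List.pyRange 0 (cs.length : Int) 8).foldl (reTabStepB cs) ([], [])
  if st.1 = [] then s
  else String.ofList (PySem.Chars.join [] st.1 ++ st.2)

-- ===== PRECONDITION & SPEC =====
def Spec_re_tab (s : String) (out : String) : Prop := out = re_tab_alt s
instance (s : String) (out : String) : Decidable (Spec_re_tab s out) := by unfold Spec_re_tab; infer_instance

-- ===== CLAIM =====
def Claim_equal_re_tab : Prop := ∀ (s : String), Dom_re_tab s → Spec_re_tab s (re_tab s)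

-- ===== LEMMAS AND PROOFS =====

-- step-8 range unfolds one element at a time
theorem pyRange8_nil (a b : Int) (h : b ≤ a) : PySem.List.pyRange a b 8 = [] := by
  rw [PySem.List.pyRange_of_pos _ _ (by norm_num)]
  simp [show ¬ a < b by omega]

theorem pyRange8_cons (a b : Int) (h : a < b) :
    PySem.List.pyRange a b 8 = a :: PySem.List.pyRange (a + 8) b 8 := by
  rw [PySem.List.pyRange_of_pos _ _ (by norm_num : (0:Int) < 8),
      PySem.List.pyRange_of_pos _ _ (by norm_num : (0:Int) < 8)]
  by_cases h2 : a + 8 < b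
  · have hn : ((b - a + 8 - 1) / 8).toNat = ((b - (a + 8) + 8 - 1) / 8).toNat + 1 := by omega
    simp only [if_pos h, if_pos h2, hn, List.range_succ_eq_map, List.map_cons, List.map_map,
      List.cons.injEq]
    refine ⟨by push_cast; ring, ?_⟩
    apply List.map_congr_left
    intro k _
    simp only [Function.comp]
    push_cast
    ring
  · have hn : ((b - a + 8 - 1) / 8).toNat = 1 := by omega
    simp [if_pos h, if_neg h2, hn, List.range_succ]

-- splitting/joining adjacent slices
theorem slice_append_slice (cs : List Char) (p k m : Int) (h0 : 0 ≤ p) (hpk : p ≤ k) (hkm : k ≤ m) :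
    PySem.List.slice cs (some p) (some k) ++ PySem.List.slice cs (some k) (some m)
      = PySem.List.slice cs (some p) (some m) := by
  rw [PySem.List.slice_toNat cs h0 (by omega), PySem.List.slice_toNat cs (by omega) (by omega),
      PySem.List.slice_toNat cs h0 (by omega)]
  have h1 : List.drop k.toNat cs = List.drop (k.toNat - p.toNat) (List.drop p.toNat cs) := by
    rw [List.drop_drop]; congr 1; omega
  rw [h1, ← List.take_add]
  congr 1
  omega

-- pending's last two characters are exactly s[k-2:k]
theorem endswith_slice (cs : List Char) (p k : Int) (h0 : 0 ≤ p) (hpk : p + 2 ≤ k)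
    (hk : k ≤ (cs.length : Int)) :
    (PySem.Chars.endswith (PySem.List.slice cs (some p) (some k)) [' ', ' '] = true)
      ↔ PySem.List.slice cs (some (k - 2)) (some k) = [' ', ' '] := by
  rw [PySem.Chars.endswith_iff, List.suffix_iff_eq_drop]
  rw [PySem.List.slice_toNat cs h0 (by omega), PySem.List.slice_toNat cs (by omega) (by omega)]
  have hlen : (List.take (k.toNat - p.toNat) (List.drop p.toNat cs)).length = k.toNat - p.toNat := by
    simp; omega
  rw [hlen, List.drop_take, List.drop_drop]
  simp only [show ([' ', ' '] : List Char).length = 2 from rfl]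
  have h2 : k.toNat - p.toNat - (k.toNat - p.toNat - 2) = 2 := by omega
  have h3 : p.toNat + (k.toNat - p.toNat - 2) = (k - 2).toNat := by omega
  have h4 : k.toNat - (k - 2).toNat = 2 := by omega
  rw [h2, h3, h4]
  exact ⟨fun h => h.symm, fun h => h.symm⟩

-- the invariant: B's fold with pending = s[p:k] tracks A's fold with cursor p
theorem loop_agree (cs : List Char) (fuel : Nat) :
    ∀ (k p : Int) (line : List (List Char)),
      ((cs.length : Int) - k).toNat ≤ fuel → 0 ≤ p → p + 8 ≤ k →
      (PySem.List.pyRange k (cs.length : Int) 8).foldl (reTabStepB cs)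
          (line, PySem.List.slice cs (some p) (some k)) =
        (((PySem.List.pyRange k (cs.length : Int) 8).foldl (reTabStepA cs) (line, p)).1,
         PySem.List.slice cs
           (some ((PySem.List.pyRange k (cs.length : Int) 8).foldl (reTabStepA cs) (line, p)).2)
           none) := by
  induction fuel with
  | zero =>
      intro k p line hf hp hpk
      have hk : (cs.length : Int) ≤ k := by omega
      rw [pyRange8_nil _ _ hk]
      simp only [List.foldl_nil]
      rw [PySem.List.slice_toNat cs hp (by omega), PySem.List.slice_from cs hp]
      rw [List.take_of_length_le (by simp; omega)]
  | succ n ih =>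
      intro k p line hf hp hpk
      by_cases hk : k < (cs.length : Int)
      · rw [pyRange8_cons _ _ hk]
        simp only [List.foldl_cons, reTabStepA, reTabStepB]
        have hcond := endswith_slice cs p k hp (by omega) (by omega)
        by_cases hc : PySem.List.slice cs (some (k - 2)) (some k) = [' ', ' ']
        · rw [if_pos (hcond.mpr hc), if_pos hc]
          exact ih (k + 8) k _ (by omega) (by omega) (by omega)
        · rw [if_neg (fun h => hc (hcond.mp h)), if_neg hc]
          rw [slice_append_slice cs p k (k + 8) hp (by omega) (by omega)]
          exact ih (k + 8) p line (by omega) hp (by omega)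
      · rw [pyRange8_nil _ _ (by omega)]
        simp only [List.foldl_nil]
        rw [PySem.List.slice_toNat cs hp (by omega), PySem.List.slice_from cs hp]
        rw [List.take_of_length_le (by simp; omega)]

-- A's cursor is 0 exactly while nothing has been appended
theorem stepA_inv (cs : List Char) :
    ∀ (l : List Int) (st : List (List Char) × Int), (∀ i ∈ l, i ≠ 0) →
      (st.1 = [] ↔ st.2 = 0) →
      ((l.foldl (reTabStepA cs) st).1 = [] ↔ (l.foldl (reTabStepA cs) st).2 = 0) := by
  intro l
  induction l with
  | nil => intro st _ h; exact h
  | cons a l ih =>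
      intro st hmem h
      simp only [List.foldl_cons]
      apply ih _ (fun i hi => hmem i (List.mem_cons_of_mem a hi))
      unfold reTabStepA
      split_ifs with hc
      · constructor
        · intro h1; exact absurd h1 (by simp)
        · intro h2; exact absurd h2 (hmem a (List.mem_cons_self ..))
      · exact h

-- concatenation-join of a snoc
theorem flat_int_snoc (xs : List (List Char)) (y : List Char) :
    (List.intersperse ([] : List Char) (xs ++ [y])).flatten
      = (List.intersperse ([] : List Char) xs).flatten ++ y := by
  induction xs with
  | nil => simp
  | cons a xs ih =>
      cases xs with
      | nil => simp
      | cons b xs' =>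
          simp only [List.cons_append, List.intersperse_cons₂, List.flatten_cons,
            List.nil_append] at *
          rw [ih, List.append_assoc]

theorem join_nil_snoc (xs : List (List Char)) (y : List Char) :
    PySem.Chars.join [] (xs ++ [y]) = PySem.Chars.join [] xs ++ y := by
  simp only [PySem.Chars.join, List.intercalate]
  exact flat_int_snoc xs y

-- ===== VERDICT =====
theorem re_tab_spec : Claim_equal_re_tab := by
  intro s _
  unfold Spec_re_tab re_tab re_tab_alt
  dsimp only
  set cs := s.toList with hcs
  by_cases h0 : (cs.length : Int) ≤ 0
  · rw [pyRange8_nil _ _ (by omega), pyRange8_nil _ _ (by omega)]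
    simp
  · rw [pyRange8_cons 0 _ (by omega)]
    simp only [List.foldl_cons]
    have hstep : reTabStepB cs ([], []) 0 = ([], PySem.List.slice cs (some 0) (some 8)) := by
      unfold reTabStepB
      rw [if_neg (by rw [PySem.Chars.endswith_iff]; intro h; simpa using h.length_le)]
      simp
    rw [hstep]
    simp only [zero_add]
    have hmain := loop_agree cs ((cs.length : Int) - 8).toNat 8 0 [] (by omega) (by omega) (by omega)
    rw [hmain]
    set stA := (PySem.List.pyRange 8 (cs.length : Int) 8).foldl (reTabStepA cs) ([], 0) with hstA
    have hiff : stA.1 = [] ↔ stA.2 = 0 := by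
      apply stepA_inv
      · intro i hi
        have := (PySem.List.mem_pyRange_iff_of_pos (by norm_num) i).mp hi
        omega
      · simp
    by_cases hz : stA.2 = 0
    · simp [hz, hiff.mpr hz]
    · rw [if_neg hz, if_neg (fun h => hz (hiff.mp h))]
      rw [join_nil_snoc]
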